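-- pv_equiv track=rewrite | github.com/Francepnadeau/Project_Masters | code/Testing_Jan13.py | DULA_transition
-- ===== SOURCE A (Python) =====
-- K_dist=2  #maximal distance allowed between edit scripts
--
-- def states_NULA(K_dist):
--     states = []  #list of possible states
--     for x in range(0,K_dist+1): # x is going from 0 to K_dist for the first component of the state.
--         for y in range(-x, x+1): # y is the second component of the state, goes from -x to x.
--             states.append( (x,y) )
--     return(states)
--
-- def insert(current_state, u):
--     next_state=[]    #list of possible output states
--     if current_state[0] < K_dist and u[K_dist + current_state[1]]== '0':
--         next_state.append( ( current_state[0]+1 , current_state[1]-1) )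
--     return( next_state )
--
-- def subs(current_state, u):
--     next_state=[]
--     if current_state[0]<K_dist and u[K_dist + current_state[1]]== '0':
--         next_state.append( (current_state[0]+1, current_state[1]) )
--     return( next_state )
--
-- def delete(current_state, u):
--     next_state=[]
--     for l in range(0, K_dist - current_state[0] + 1 ):  # l is an index to go from 0 to K_dist-x.
--         if l == 0:  #the case where we only have identity.
--             if u[K_dist + current_state[1]] == '1':  #check if the bit K_dist+y+1 in u is 1
--                 next_state.append( (current_state[0] , current_state[1]) )
--         elif u[K_dist + current_state[1] : K_dist + current_state[1] + l + 1] == '0'*l + '1': #check if we have the correct sequence of 0's followed by '1'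
--             next_state.append( (current_state[0]+l , current_state[1]+l) )
--     return( next_state )
--
-- def delta(current_state, u):  # function delta_k, that tests for all the transitions from state labeled (x,y) and returns a list of the possible output states.
--                               # Input is the starting state and a bit string u, of length 2k+1.
--                               # we test for all three functions and update next_state each time with the possible output
--     next_state=insert(current_state, u)   # we test for the insert function
--     next_state+=subs(current_state, u)    # we test for the substitution function
--     next_state+=delete(current_state, u)  # we test for the delition/identity function\
--     return( next_state )
--
-- def DULA_transition(state,bit):
--     next_state = {}  #Output state
--     nula_states = states_NULA(K_dist)  #The states of NULA of the form (x,y)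
--     new=[]
--
--     for i in range(len(state)):
--         if state[i]==1:                       #We test the transition with state i of nula_states
--             new += delta(nula_states[i],bit)  #Creating a list 'new' of the output states of NULA
--     for j in range(len(nula_states)): #We need to reconvert these states into numbers for the states of DULA
--         if nula_states[j] in new:
--             next_state[j]=1
--         else:
--             next_state[j]=0
--     return(next_state)
-- ===== SOURCE B (Python) =====
-- K_dist = 2
--
-- def _active(state, x, y):
--     # is NULA state (x, y) marked in the input bitmap?
--     if x < 0 or x > K_dist or y < -x or y > x:
--         return False
--     i = x * x + x + y          # position of (x, y) in the NULA state enumeration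
--     return i < len(state) and state[i] == 1
--
-- def _hit(state, bit, x, y):
--     # is target state (x, y) produced by some marked predecessor?  (pull /
--     # predecessor form of the transition: no successor lists are ever built)
--     p = K_dist + y
--     return ((_active(state, x, y) and bit[p] == '1')                    # identity
--         or (_active(state, x - 1, y) and bit[p] == '0')                 # substitution
--         or (_active(state, x - 1, y + 1) and bit[p + 1] == '0')         # insertion
--         or any(_active(state, x - l, y - l) and bit[p:p+1] == '1'       # deletion of l symbols
--                and all(bit[k] == '0' for k in range(p - l, p))
--                for l in range(1, (x + y) // 2 + 1)))
--
-- def DULA_transition(state, bit):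
--     next_state = {}
--     j = 0
--     for x in range(K_dist + 1):
--         for y in range(-x, x + 1):
--             next_state[j] = 1 if _hit(state, bit, x, y) else 0
--             j += 1
--     return next_state
-- ===== Notes on version B (the rewrite author's own statement) =====
-- stated objective: alternative
-- what changed: B inverts the transition: instead of pushing successor lists out of every active state and then membership-scanning them for each of the 9 output states, it decides each output bit directly from its possible predecessors (identity/substitution/insertion/deletion preconditions read off the window), so no successor list, no delta helper and no membership pass exist at all.
import Mathlib
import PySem

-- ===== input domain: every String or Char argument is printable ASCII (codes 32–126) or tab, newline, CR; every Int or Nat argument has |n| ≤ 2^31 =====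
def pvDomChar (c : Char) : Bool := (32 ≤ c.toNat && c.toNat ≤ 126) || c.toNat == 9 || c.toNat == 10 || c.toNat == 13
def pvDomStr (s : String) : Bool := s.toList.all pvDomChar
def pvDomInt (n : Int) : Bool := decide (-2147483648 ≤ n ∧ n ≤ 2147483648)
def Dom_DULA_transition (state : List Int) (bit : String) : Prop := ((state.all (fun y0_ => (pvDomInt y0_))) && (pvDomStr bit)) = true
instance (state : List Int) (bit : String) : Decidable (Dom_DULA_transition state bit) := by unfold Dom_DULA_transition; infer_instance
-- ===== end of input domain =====

-- B inverts the transition: each output bit is decided directly from its possible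
-- predecessors, so no successor list and no membership pass exist; objective: alternative.

def Kd : Int := 2   -- the module constant K_dist = 2

-- ===== PORT A =====
def statesNULA (K : Int) : List (Int × Int) :=
  (PySem.List.pyRange 0 (K + 1) 1).foldl (fun states x =>
    (PySem.List.pyRange (-x) (x + 1) 1).foldl (fun states y => states ++ [(x, y)]) states) []

def pyInsert (cs : Int × Int) (u : String) : List (Int × Int) :=
  if cs.1 < Kd ∧ PySem.Str.pyGet? u (Kd + cs.2) = some '0' then [(cs.1 + 1, cs.2 - 1)] else []

def pySubs (cs : Int × Int) (u : String) : List (Int × Int) :=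
  if cs.1 < Kd ∧ PySem.Str.pyGet? u (Kd + cs.2) = some '0' then [(cs.1 + 1, cs.2)] else []

def pyDelete (cs : Int × Int) (u : String) : List (Int × Int) :=
  (PySem.List.pyRange 0 (Kd - cs.1 + 1) 1).foldl (fun ns l =>
    if l = 0 then
      if PySem.Str.pyGet? u (Kd + cs.2) = some '1' then ns ++ [(cs.1, cs.2)] else ns
    else
      -- string equality u[p:p+l+1] == '0'*l + '1' compared on code points
      if (PySem.Str.slice u (some (Kd + cs.2)) (some (Kd + cs.2 + l + 1))).toList
          = List.replicate l.toNat '0' ++ ['1'] then ns ++ [(cs.1 + l, cs.2 + l)] else ns) []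

def pyDelta (cs : Int × Int) (u : String) : List (Int × Int) :=
  pyInsert cs u ++ pySubs cs u ++ pyDelete cs u

def DULA_transition (state : List Int) (bit : String) : List (Int × Int) :=
  let nula := statesNULA Kd
  let new := (PySem.List.pyRange 0 (state.length : Int) 1).foldl (fun new i =>
    if PySem.List.pyGet? state i = some 1 then
      match PySem.List.pyGet? nula i with
      | some cs => new ++ pyDelta cs bit
      | none => new        -- Python raises IndexError here; excluded by Pre_
    else new) []
  ((PySem.List.pyRange 0 (nula.length : Int) 1).foldl (fun d j =>
      match PySem.List.pyGet? nula j with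
      | some s => if s ∈ new then d.insert j 1 else d.insert j 0
      | none => d) (PySem.Dict.empty : PySem.Dict Int Int)).items

-- ===== PORT B =====
-- is NULA state (x, y) marked in the input bitmap?
def altActive (state : List Int) (x y : Int) : Bool :=
  if x < 0 ∨ x > 2 ∨ y < -x ∨ y > x then false
  else
    let i := x * x + x + y   -- position of (x, y) in the NULA state enumeration
    decide (i < (state.length : Int)) && (PySem.List.pyGet? state i == some 1)

-- is target state (x, y) produced by some marked predecessor? (short-circuit 'or' chain)
def altHit (state : List Int) (bit : String) (x y : Int) : Bool :=
  let p : Int := 2 + y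
  (altActive state x y && (PySem.Str.pyGet? bit p == some '1'))                        -- identity
  || (altActive state (x - 1) y && (PySem.Str.pyGet? bit p == some '0'))               -- substitution
  || (altActive state (x - 1) (y + 1) && (PySem.Str.pyGet? bit (p + 1) == some '0'))   -- insertion
  || (PySem.List.pyRange 1 (PySem.Int.floordiv (x + y) 2 + 1) 1).any (fun l =>         -- deletion of l symbols
       altActive state (x - l) (y - l)
       && ((PySem.Str.slice bit (some p) (some (p + 1))).toList == ['1'])
       && (PySem.List.pyRange (p - l) p 1).all (fun k => PySem.Str.pyGet? bit k == some '0'))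

def DULA_transition_alt (state : List Int) (bit : String) : List (Int × Int) :=
  ((PySem.List.pyRange 0 3 1).foldl (fun (acc : PySem.Dict Int Int × Int) x =>
      (PySem.List.pyRange (-x) (x + 1) 1).foldl (fun acc y =>
        (acc.1.insert acc.2 (if altHit state bit x y then 1 else 0), acc.2 + 1)) acc)
    ((PySem.Dict.empty : PySem.Dict Int Int), 0)).1.items

-- ===== PRECONDITION & SPEC =====
def nulaTable : List (Int × Int) := [(0,0),(1,-1),(1,0),(1,1),(2,-2),(2,-1),(2,0),(2,1),(2,2)]

-- Pre_ excludes exactly the inputs on which A raises IndexError: a set bit at an index ≥ 9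
-- (no NULA state) or a window string too short for that state's probe position K_dist + y.
def Pre_DULA_transition (state : List Int) (bit : String) : Prop :=
  ∀ i : Nat, i < state.length → state.getD i 0 = 1 →
    i < 9 ∧ 3 + (nulaTable.getD i (0,0)).2 ≤ (bit.toList.length : Int)

instance (state : List Int) (bit : String) : Decidable (Pre_DULA_transition state bit) := by
  unfold Pre_DULA_transition; infer_instance

def pvWitness_DULA_transition : List Int × String := ([1, 0, 1], "0110")

def Spec_DULA_transition (state : List Int) (bit : String) (out : List (Int × Int)) : Prop := out = DULA_transition_alt state bit
instance (state : List Int) (bit : String) (out : List (Int × Int)) : Decidable (Spec_DULA_transition state bit out) := by unfold Spec_DULA_transition; infer_instance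

-- ===== CLAIM (what is proved, stated in full; the proofs are below) =====
def Claim_equal_DULA_transition : Prop := ∀ (state : List Int) (bit : String), Dom_DULA_transition state bit → Pre_DULA_transition state bit → Spec_DULA_transition state bit (DULA_transition state bit)

-- ===== LEMMAS AND PROOFS =====

-- representation of both programs' output dict {0: b0, …, 8: b8}
def mkRep (g : Int → Int) : PySem.Dict Int Int :=
  PySem.Dict.mk [(0, g 0), (1, g 1), (2, g 2), (3, g 3), (4, g 4), (5, g 5), (6, g 6), (7, g 7), (8, g 8)]

set_option maxHeartbeats 2000000 in
theorem items_chain (b0 b1 b2 b3 b4 b5 b6 b7 b8 : Int) :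
    ((((((((((PySem.Dict.empty : PySem.Dict Int Int).insert 0 b0).insert 1 b1).insert 2 b2).insert 3 b3).insert 4 b4).insert 5 b5).insert 6 b6).insert 7 b7).insert 8 b8)
    = mkRep (fun j => if j = 0 then b0 else if j = 1 then b1 else if j = 2 then b2 else if j = 3 then b3 else if j = 4 then b4 else if j = 5 then b5 else if j = 6 then b6 else if j = 7 then b7 else b8) := rfl

theorem mkRep_congr (g g' : Int → Int) (h : ∀ j : Nat, j < 9 → g j = g' j) : mkRep g = mkRep g' := by
  unfold mkRep
  have h0 := h 0 (by omega); have h1 := h 1 (by omega); have h2 := h 2 (by omega)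
  have h3 := h 3 (by omega); have h4 := h 4 (by omega); have h5 := h 5 (by omega)
  have h6 := h 6 (by omega); have h7 := h 7 (by omega); have h8 := h 8 (by omega)
  push_cast at *
  rw [h0, h1, h2, h3, h4, h5, h6, h7, h8]

-- A's first loop, as a named function (proof helper)
def Anew (state : List Int) (bit : String) : List (Int × Int) :=
  (PySem.List.pyRange 0 (state.length : Int) 1).foldl (fun new i =>
    if PySem.List.pyGet? state i = some 1 then
      match PySem.List.pyGet? nulaTable i with
      | some cs => new ++ pyDelta cs bit
      | none => new
    else new) []

theorem Anew_append (xs : List Int) (v : Int) (bit : String) :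
    Anew (xs ++ [v]) bit = Anew xs bit ++
      (if v = 1 then
        match PySem.List.pyGet? nulaTable (xs.length : Int) with
        | some cs => pyDelta cs bit
        | none => []
      else []) := by
  have hlen : (((xs ++ [v]).length : Nat) : Int) = (xs.length : Int) + 1 := by simp
  have hprefix : (PySem.List.pyRange 0 (xs.length : Int) 1).foldl (fun new i =>
      if PySem.List.pyGet? (xs ++ [v]) i = some 1 then
        match PySem.List.pyGet? nulaTable i with
        | some cs => new ++ pyDelta cs bit
        | none => new
      else new) [] = Anew xs bit := by
    unfold Anew
    apply PySem.List.foldl_congr_mem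
    intro acc i hi
    rw [PySem.List.mem_pyRange_one] at hi
    rw [PySem.List.pyGet?_of_nonneg (xs ++ [v]) hi.1, PySem.List.pyGet?_of_nonneg xs hi.1,
      List.getElem?_append_left (by omega)]
  unfold Anew
  rw [hlen, PySem.List.pyRange_one_succ_right (by positivity), List.foldl_append, hprefix]
  simp only [List.foldl_cons, List.foldl_nil]
  have h2 : PySem.List.pyGet? (xs ++ [v]) (xs.length : Int) = some v := by
    rw [PySem.List.pyGet?_natCast, List.getElem?_append_right le_rfl]
    simp
  rw [h2]
  by_cases hv : v = 1
  · subst hv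
    rw [if_pos rfl, if_pos rfl]
    cases hn : PySem.List.pyGet? nulaTable (xs.length : Int) with
    | none => rw [List.append_nil]; rfl
    | some cs => rfl
  · rw [if_neg (by simpa using hv), if_neg hv, List.append_nil]
    rfl

theorem memAnew (state : List Int) (bit : String) (t : Int × Int) :
    t ∈ Anew state bit ↔ ∃ i : Nat, i < 9 ∧ PySem.List.pyGet? state (i : Int) = some 1 ∧
      t ∈ pyDelta (nulaTable.getD i (0,0)) bit := by
  induction state using List.reverseRecOn with
  | nil =>
    rw [show Anew [] bit = [] from rfl]
    simp [PySem.List.pyGet?_natCast]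
  | append_singleton xs v ih =>
    rw [Anew_append, List.mem_append, ih]
    constructor
    · rintro (⟨i, hi9, hact, hmem⟩ | hnew)
      · refine ⟨i, hi9, ?_, hmem⟩
        rw [PySem.List.pyGet?_natCast] at hact ⊢
        have hilt : i < xs.length := by
          have := List.getElem?_eq_some_iff.mp hact
          exact this.1
        rw [List.getElem?_append_left hilt]
        exact hact
      · by_cases hv : v = 1
        · rw [if_pos hv] at hnew
          cases hn : PySem.List.pyGet? nulaTable (xs.length : Int) with
          | none => rw [hn] at hnew; simp at hnew
          | some cs =>
            rw [hn] at hnew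
            rw [PySem.List.pyGet?_natCast] at hn
            have h9 : xs.length < 9 := by
              have := List.getElem?_eq_some_iff.mp hn
              simpa [nulaTable] using this.1
            have hcs : cs = nulaTable.getD xs.length (0,0) := by
              have := List.getElem?_eq_some_iff.mp hn
              rw [List.getD_eq_getElem _ _ (by simpa [nulaTable] using h9)]
              exact this.2.symm
            refine ⟨xs.length, h9, ?_, by rw [← hcs]; exact hnew⟩
            rw [PySem.List.pyGet?_natCast, List.getElem?_append_right le_rfl]
            simp [hv]
        · rw [if_neg hv] at hnew; simp at hnew
    · rintro ⟨i, hi9, hact, hmem⟩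
      rw [PySem.List.pyGet?_natCast] at hact
      have hilt : i < xs.length + 1 := by
        have := List.getElem?_eq_some_iff.mp hact
        simpa using this.1
      by_cases hix : i < xs.length
      · refine Or.inl ⟨i, hi9, ?_, hmem⟩
        rw [PySem.List.pyGet?_natCast]
        rw [List.getElem?_append_left hix] at hact
        exact hact
      · have hieq : i = xs.length := by omega
        subst hieq
        have hv : v = 1 := by
          rw [List.getElem?_append_right le_rfl] at hact
          simpa using hact
        refine Or.inr ?_
        rw [if_pos hv]
        have hn : PySem.List.pyGet? nulaTable (xs.length : Int) = some (nulaTable.getD xs.length (0,0)) := by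
          have h9' : xs.length < nulaTable.length := by simpa [nulaTable] using hi9
          rw [PySem.List.pyGet?_natCast, List.getElem?_eq_getElem h9', List.getD_eq_getElem _ _ h9']
        rw [hn]
        exact hmem
def seg (c : Prop) [Decidable c] (t : Int × Int) : List (Int × Int) := if c then [t] else []

theorem mem_seg (c : Prop) [inst : Decidable c] (t u : Int × Int) : u ∈ seg c t ↔ c ∧ u = t := by
  unfold seg; split_ifs with h <;> simp_all

set_option maxHeartbeats 4000000 in
theorem pyDelta_eq (s : Int × Int) (hs : s ∈ nulaTable) (bit : String) :
    pyDelta s bit =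
      seg (s.1 < 2 ∧ PySem.Str.pyGet? bit (2 + s.2) = some '0') (s.1 + 1, s.2 - 1)
      ++ seg (s.1 < 2 ∧ PySem.Str.pyGet? bit (2 + s.2) = some '0') (s.1 + 1, s.2)
      ++ seg (PySem.Str.pyGet? bit (2 + s.2) = some '1') s
      ++ seg (s.1 ≤ 1 ∧ (PySem.Str.slice bit (some (2 + s.2)) (some (2 + s.2 + 2))).toList = ['0', '1']) (s.1 + 1, s.2 + 1)
      ++ seg (s.1 = 0 ∧ (PySem.Str.slice bit (some (2 + s.2)) (some (2 + s.2 + 3))).toList = ['0', '0', '1']) (s.1 + 2, s.2 + 2) := by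
  fin_cases hs <;>
    simp only [pyDelta, pyInsert, pySubs, pyDelete, seg, Kd] <;>
    [rw [show PySem.List.pyRange 0 (2 - 0 + 1) 1 = [0, 1, 2] from by decide];
     rw [show PySem.List.pyRange 0 (2 - 1 + 1) 1 = [0, 1] from by decide];
     rw [show PySem.List.pyRange 0 (2 - 1 + 1) 1 = [0, 1] from by decide];
     rw [show PySem.List.pyRange 0 (2 - 1 + 1) 1 = [0, 1] from by decide];
     rw [show PySem.List.pyRange 0 (2 - 2 + 1) 1 = [0] from by decide];
     rw [show PySem.List.pyRange 0 (2 - 2 + 1) 1 = [0] from by decide];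
     rw [show PySem.List.pyRange 0 (2 - 2 + 1) 1 = [0] from by decide];
     rw [show PySem.List.pyRange 0 (2 - 2 + 1) 1 = [0] from by decide];
     rw [show PySem.List.pyRange 0 (2 - 2 + 1) 1 = [0] from by decide]] <;>
    simp only [List.foldl_cons, List.foldl_nil] <;>
    norm_num [List.replicate] <;>
    split_ifs <;> simp_all
theorem take1_iff (v : List Char) (a : Char) : v.take 1 = [a] ↔ v[0]? = some a := by
  cases v <;> simp

theorem take2_iff (v : List Char) (a b : Char) :
    v.take 2 = [a, b] ↔ (v[0]? = some a ∧ v[1]? = some b) := by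
  rcases v with _ | ⟨x, _ | ⟨y, w⟩⟩ <;> simp

theorem take3_iff (v : List Char) (a b c : Char) :
    v.take 3 = [a, b, c] ↔ (v[0]? = some a ∧ v[1]? = some b ∧ v[2]? = some c) := by
  rcases v with _ | ⟨x, _ | ⟨y, _ | ⟨z, w⟩⟩⟩ <;> simp

theorem sl1 (bit : String) (q q1 : Int) (h0 : 0 ≤ q) (h1 : q1 = q + 1) (c : Char) :
    ((PySem.Str.slice bit (some q) (some q1)).toList = [c]) ↔ PySem.Str.pyGet? bit q = some c := by
  subst h1
  rw [PySem.Str.toList_slice, PySem.Chars.slice_eq_listSlice, PySem.List.slice_toNat (xs := bit.toList) (a := q) (b := q+1) h0 (by omega),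
    show (q + 1).toNat - q.toNat = 1 from by omega, take1_iff, List.getElem?_drop,
    PySem.Str.pyGet?_eq, PySem.Chars.pyGet?_eq_listPyGet?, PySem.List.pyGet?_of_nonneg _ h0, Nat.add_zero]

theorem sl2 (bit : String) (q q1 q2 : Int) (h0 : 0 ≤ q) (h1 : q1 = q + 1) (h2 : q2 = q + 2) :
    ((PySem.Str.slice bit (some q) (some q2)).toList = ['0', '1']) ↔
      (PySem.Str.pyGet? bit q = some '0' ∧ PySem.Str.pyGet? bit q1 = some '1') := by
  subst h1; subst h2
  rw [PySem.Str.toList_slice, PySem.Chars.slice_eq_listSlice, PySem.List.slice_toNat (xs := bit.toList) (a := q) (b := q+2) h0 (by omega),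
    show (q + 2).toNat - q.toNat = 2 from by omega, take2_iff, List.getElem?_drop, List.getElem?_drop,
    PySem.Str.pyGet?_eq, PySem.Chars.pyGet?_eq_listPyGet?, PySem.Str.pyGet?_eq, PySem.Chars.pyGet?_eq_listPyGet?, PySem.List.pyGet?_of_nonneg _ h0,
    PySem.List.pyGet?_of_nonneg _ (by omega : (0:Int) ≤ q + 1),
    show (q + 1).toNat = q.toNat + 1 from by omega, Nat.add_zero]

theorem sl3 (bit : String) (q q1 q2 q3 : Int) (h0 : 0 ≤ q) (h1 : q1 = q + 1) (h2 : q2 = q + 2) (h3 : q3 = q + 3) :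
    ((PySem.Str.slice bit (some q) (some q3)).toList = ['0', '0', '1']) ↔
      (PySem.Str.pyGet? bit q = some '0' ∧ PySem.Str.pyGet? bit q1 = some '0' ∧ PySem.Str.pyGet? bit q2 = some '1') := by
  subst h1; subst h2; subst h3
  rw [PySem.Str.toList_slice, PySem.Chars.slice_eq_listSlice, PySem.List.slice_toNat (xs := bit.toList) (a := q) (b := q+3) h0 (by omega),
    show (q + 3).toNat - q.toNat = 3 from by omega, take3_iff, List.getElem?_drop, List.getElem?_drop, List.getElem?_drop,
    PySem.Str.pyGet?_eq, PySem.Chars.pyGet?_eq_listPyGet?, PySem.Str.pyGet?_eq, PySem.Chars.pyGet?_eq_listPyGet?, PySem.Str.pyGet?_eq, PySem.Chars.pyGet?_eq_listPyGet?, PySem.List.pyGet?_of_nonneg _ h0,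
    PySem.List.pyGet?_of_nonneg _ (by omega : (0:Int) ≤ q + 1),
    PySem.List.pyGet?_of_nonneg _ (by omega : (0:Int) ≤ q + 2),
    show (q + 1).toNat = q.toNat + 1 from by omega, show (q + 2).toNat = q.toNat + 2 from by omega, Nat.add_zero]

theorem act_eq (state : List Int) (x y i : Int) (hv : ¬(x < 0 ∨ x > 2 ∨ y < -x ∨ y > x))
    (hi : x * x + x + y = i) (h0 : 0 ≤ i) :
    (altActive state x y = true) ↔ PySem.List.pyGet? state i = some 1 := by
  unfold altActive
  rw [if_neg hv]
  simp only [hi, Bool.and_eq_true, decide_eq_true_iff, beq_iff_eq]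
  constructor
  · exact fun h => h.2
  · intro hg
    refine ⟨?_, hg⟩
    rw [PySem.List.pyGet?_of_nonneg _ h0] at hg
    have := (List.getElem?_eq_some_iff.mp hg).1
    omega

theorem act_false (state : List Int) (x y : Int) (hv : x < 0 ∨ x > 2 ∨ y < -x ∨ y > x) :
    altActive state x y = false := by
  unfold altActive
  rw [if_pos hv]

theorem exists9 (P : Nat → Prop) :
    (∃ i : Nat, i < 9 ∧ P i) ↔ P 0 ∨ P 1 ∨ P 2 ∨ P 3 ∨ P 4 ∨ P 5 ∨ P 6 ∨ P 7 ∨ P 8 := by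
  constructor
  · rintro ⟨i, hi, h⟩
    interval_cases i <;> tauto
  · rintro (h | h | h | h | h | h | h | h | h)
    exacts [⟨0, by omega, h⟩, ⟨1, by omega, h⟩, ⟨2, by omega, h⟩, ⟨3, by omega, h⟩,
      ⟨4, by omega, h⟩, ⟨5, by omega, h⟩, ⟨6, by omega, h⟩, ⟨7, by omega, h⟩, ⟨8, by omega, h⟩]

set_option maxHeartbeats 4000000 in
theorem key0 (state : List Int) (bit : String) :
    (nulaTable.getD 0 (0,0) ∈ Anew state bit) ↔ altHit state bit 0 0 = true := by
  rw [memAnew, exists9]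
  simp only [show nulaTable.getD 0 (0,0) = (0,0) from rfl, show nulaTable.getD 1 (0,0) = (1,-1) from rfl,
    show nulaTable.getD 2 (0,0) = (1,0) from rfl, show nulaTable.getD 3 (0,0) = (1,1) from rfl,
    show nulaTable.getD 4 (0,0) = (2,-2) from rfl, show nulaTable.getD 5 (0,0) = (2,-1) from rfl,
    show nulaTable.getD 6 (0,0) = (2,0) from rfl, show nulaTable.getD 7 (0,0) = (2,1) from rfl,
    show nulaTable.getD 8 (0,0) = (2,2) from rfl,
    pyDelta_eq (0,0) (by decide) bit, pyDelta_eq (1,-1) (by decide) bit, pyDelta_eq (1,0) (by decide) bit,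
    pyDelta_eq (1,1) (by decide) bit, pyDelta_eq (2,-2) (by decide) bit, pyDelta_eq (2,-1) (by decide) bit,
    pyDelta_eq (2,0) (by decide) bit, pyDelta_eq (2,1) (by decide) bit, pyDelta_eq (2,2) (by decide) bit,
    List.mem_append, mem_seg, altHit]
  rw [show PySem.List.pyRange 1 (PySem.Int.floordiv (0 + 0) 2 + 1) 1 = [] from by decide]
  simp only [List.any_nil]
  simp only [Bool.or_eq_true, Bool.and_eq_true, beq_iff_eq,
    act_eq state 0 0 0 (by norm_num) (by norm_num) (by norm_num),
    act_false state (0 - 1) 0 (by norm_num),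
    act_false state (0 - 1) (0 + 1) (by norm_num)]
  norm_num

set_option maxHeartbeats 4000000 in
theorem key1 (state : List Int) (bit : String) :
    (nulaTable.getD 1 (0,0) ∈ Anew state bit) ↔ altHit state bit 1 (-1) = true := by
  rw [memAnew, exists9]
  simp only [show nulaTable.getD 0 (0,0) = (0,0) from rfl, show nulaTable.getD 1 (0,0) = (1,-1) from rfl,
    show nulaTable.getD 2 (0,0) = (1,0) from rfl, show nulaTable.getD 3 (0,0) = (1,1) from rfl,
    show nulaTable.getD 4 (0,0) = (2,-2) from rfl, show nulaTable.getD 5 (0,0) = (2,-1) from rfl,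
    show nulaTable.getD 6 (0,0) = (2,0) from rfl, show nulaTable.getD 7 (0,0) = (2,1) from rfl,
    show nulaTable.getD 8 (0,0) = (2,2) from rfl,
    pyDelta_eq (0,0) (by decide) bit, pyDelta_eq (1,-1) (by decide) bit, pyDelta_eq (1,0) (by decide) bit,
    pyDelta_eq (1,1) (by decide) bit, pyDelta_eq (2,-2) (by decide) bit, pyDelta_eq (2,-1) (by decide) bit,
    pyDelta_eq (2,0) (by decide) bit, pyDelta_eq (2,1) (by decide) bit, pyDelta_eq (2,2) (by decide) bit,
    List.mem_append, mem_seg, altHit]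
  rw [show PySem.List.pyRange 1 (PySem.Int.floordiv (1 + -1) 2 + 1) 1 = [] from by decide]
  simp only [List.any_nil]
  simp only [Bool.or_eq_true, Bool.and_eq_true, beq_iff_eq,
    act_eq state 1 (-1) 1 (by norm_num) (by norm_num) (by norm_num),
    act_false state (1 - 1) (-1) (by norm_num),
    act_eq state (1 - 1) ((-1) + 1) 0 (by norm_num) (by norm_num) (by norm_num)]
  norm_num
  all_goals tauto

set_option maxHeartbeats 4000000 in
theorem key2 (state : List Int) (bit : String) :
    (nulaTable.getD 2 (0,0) ∈ Anew state bit) ↔ altHit state bit 1 0 = true := by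
  rw [memAnew, exists9]
  simp only [show nulaTable.getD 0 (0,0) = (0,0) from rfl, show nulaTable.getD 1 (0,0) = (1,-1) from rfl,
    show nulaTable.getD 2 (0,0) = (1,0) from rfl, show nulaTable.getD 3 (0,0) = (1,1) from rfl,
    show nulaTable.getD 4 (0,0) = (2,-2) from rfl, show nulaTable.getD 5 (0,0) = (2,-1) from rfl,
    show nulaTable.getD 6 (0,0) = (2,0) from rfl, show nulaTable.getD 7 (0,0) = (2,1) from rfl,
    show nulaTable.getD 8 (0,0) = (2,2) from rfl,
    pyDelta_eq (0,0) (by decide) bit, pyDelta_eq (1,-1) (by decide) bit, pyDelta_eq (1,0) (by decide) bit,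
    pyDelta_eq (1,1) (by decide) bit, pyDelta_eq (2,-2) (by decide) bit, pyDelta_eq (2,-1) (by decide) bit,
    pyDelta_eq (2,0) (by decide) bit, pyDelta_eq (2,1) (by decide) bit, pyDelta_eq (2,2) (by decide) bit,
    List.mem_append, mem_seg, altHit]
  rw [show PySem.List.pyRange 1 (PySem.Int.floordiv (1 + 0) 2 + 1) 1 = [] from by decide]
  simp only [List.any_nil]
  simp only [Bool.or_eq_true, Bool.and_eq_true, beq_iff_eq,
    act_eq state 1 0 2 (by norm_num) (by norm_num) (by norm_num),
    act_eq state (1 - 1) 0 0 (by norm_num) (by norm_num) (by norm_num),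
    act_false state (1 - 1) (0 + 1) (by norm_num)]
  norm_num
  all_goals tauto

set_option maxHeartbeats 4000000 in
theorem key3 (state : List Int) (bit : String) :
    (nulaTable.getD 3 (0,0) ∈ Anew state bit) ↔ altHit state bit 1 1 = true := by
  rw [memAnew, exists9]
  simp only [show nulaTable.getD 0 (0,0) = (0,0) from rfl, show nulaTable.getD 1 (0,0) = (1,-1) from rfl,
    show nulaTable.getD 2 (0,0) = (1,0) from rfl, show nulaTable.getD 3 (0,0) = (1,1) from rfl,
    show nulaTable.getD 4 (0,0) = (2,-2) from rfl, show nulaTable.getD 5 (0,0) = (2,-1) from rfl,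
    show nulaTable.getD 6 (0,0) = (2,0) from rfl, show nulaTable.getD 7 (0,0) = (2,1) from rfl,
    show nulaTable.getD 8 (0,0) = (2,2) from rfl,
    pyDelta_eq (0,0) (by decide) bit, pyDelta_eq (1,-1) (by decide) bit, pyDelta_eq (1,0) (by decide) bit,
    pyDelta_eq (1,1) (by decide) bit, pyDelta_eq (2,-2) (by decide) bit, pyDelta_eq (2,-1) (by decide) bit,
    pyDelta_eq (2,0) (by decide) bit, pyDelta_eq (2,1) (by decide) bit, pyDelta_eq (2,2) (by decide) bit,
    List.mem_append, mem_seg, altHit]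
  rw [show PySem.List.pyRange 1 (PySem.Int.floordiv (1 + 1) 2 + 1) 1 = [1] from by decide]
  simp only [List.any_cons, List.any_nil]
  rw [show PySem.List.pyRange (2 + 1 - 1) (2 + 1) 1 = [2] from by decide]
  simp only [List.all_cons, List.all_nil, Bool.or_eq_true, Bool.and_eq_true, beq_iff_eq,
    act_eq state 1 1 3 (by norm_num) (by norm_num) (by norm_num),
    act_false state (1 - 1) 1 (by norm_num),
    act_false state (1 - 1) (1 + 1) (by norm_num),
    act_eq state (1 - 1) (1 - 1) 0 (by norm_num) (by norm_num) (by norm_num),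
    sl1 bit (2 + 1) (2 + 1 + 1) (by norm_num) (by norm_num),
    sl2 bit (2 + 0) 3 (2 + 0 + 2) (by norm_num) (by norm_num) (by norm_num)]
  norm_num
  all_goals tauto

set_option maxHeartbeats 4000000 in
theorem key4 (state : List Int) (bit : String) :
    (nulaTable.getD 4 (0,0) ∈ Anew state bit) ↔ altHit state bit 2 (-2) = true := by
  rw [memAnew, exists9]
  simp only [show nulaTable.getD 0 (0,0) = (0,0) from rfl, show nulaTable.getD 1 (0,0) = (1,-1) from rfl,
    show nulaTable.getD 2 (0,0) = (1,0) from rfl, show nulaTable.getD 3 (0,0) = (1,1) from rfl,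
    show nulaTable.getD 4 (0,0) = (2,-2) from rfl, show nulaTable.getD 5 (0,0) = (2,-1) from rfl,
    show nulaTable.getD 6 (0,0) = (2,0) from rfl, show nulaTable.getD 7 (0,0) = (2,1) from rfl,
    show nulaTable.getD 8 (0,0) = (2,2) from rfl,
    pyDelta_eq (0,0) (by decide) bit, pyDelta_eq (1,-1) (by decide) bit, pyDelta_eq (1,0) (by decide) bit,
    pyDelta_eq (1,1) (by decide) bit, pyDelta_eq (2,-2) (by decide) bit, pyDelta_eq (2,-1) (by decide) bit,
    pyDelta_eq (2,0) (by decide) bit, pyDelta_eq (2,1) (by decide) bit, pyDelta_eq (2,2) (by decide) bit,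
    List.mem_append, mem_seg, altHit]
  rw [show PySem.List.pyRange 1 (PySem.Int.floordiv (2 + -2) 2 + 1) 1 = [] from by decide]
  simp only [List.any_nil]
  simp only [Bool.or_eq_true, Bool.and_eq_true, beq_iff_eq,
    act_eq state 2 (-2) 4 (by norm_num) (by norm_num) (by norm_num),
    act_false state (2 - 1) (-2) (by norm_num),
    act_eq state (2 - 1) ((-2) + 1) 1 (by norm_num) (by norm_num) (by norm_num)]
  norm_num
  all_goals tauto

set_option maxHeartbeats 4000000 in
theorem key5 (state : List Int) (bit : String) :
    (nulaTable.getD 5 (0,0) ∈ Anew state bit) ↔ altHit state bit 2 (-1) = true := by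
  rw [memAnew, exists9]
  simp only [show nulaTable.getD 0 (0,0) = (0,0) from rfl, show nulaTable.getD 1 (0,0) = (1,-1) from rfl,
    show nulaTable.getD 2 (0,0) = (1,0) from rfl, show nulaTable.getD 3 (0,0) = (1,1) from rfl,
    show nulaTable.getD 4 (0,0) = (2,-2) from rfl, show nulaTable.getD 5 (0,0) = (2,-1) from rfl,
    show nulaTable.getD 6 (0,0) = (2,0) from rfl, show nulaTable.getD 7 (0,0) = (2,1) from rfl,
    show nulaTable.getD 8 (0,0) = (2,2) from rfl,
    pyDelta_eq (0,0) (by decide) bit, pyDelta_eq (1,-1) (by decide) bit, pyDelta_eq (1,0) (by decide) bit,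
    pyDelta_eq (1,1) (by decide) bit, pyDelta_eq (2,-2) (by decide) bit, pyDelta_eq (2,-1) (by decide) bit,
    pyDelta_eq (2,0) (by decide) bit, pyDelta_eq (2,1) (by decide) bit, pyDelta_eq (2,2) (by decide) bit,
    List.mem_append, mem_seg, altHit]
  rw [show PySem.List.pyRange 1 (PySem.Int.floordiv (2 + -1) 2 + 1) 1 = [] from by decide]
  simp only [List.any_nil]
  simp only [Bool.or_eq_true, Bool.and_eq_true, beq_iff_eq,
    act_eq state 2 (-1) 5 (by norm_num) (by norm_num) (by norm_num),
    act_eq state (2 - 1) (-1) 1 (by norm_num) (by norm_num) (by norm_num),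
    act_eq state (2 - 1) ((-1) + 1) 2 (by norm_num) (by norm_num) (by norm_num)]
  norm_num
  all_goals tauto

set_option maxHeartbeats 4000000 in
theorem key6 (state : List Int) (bit : String) :
    (nulaTable.getD 6 (0,0) ∈ Anew state bit) ↔ altHit state bit 2 0 = true := by
  rw [memAnew, exists9]
  simp only [show nulaTable.getD 0 (0,0) = (0,0) from rfl, show nulaTable.getD 1 (0,0) = (1,-1) from rfl,
    show nulaTable.getD 2 (0,0) = (1,0) from rfl, show nulaTable.getD 3 (0,0) = (1,1) from rfl,
    show nulaTable.getD 4 (0,0) = (2,-2) from rfl, show nulaTable.getD 5 (0,0) = (2,-1) from rfl,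
    show nulaTable.getD 6 (0,0) = (2,0) from rfl, show nulaTable.getD 7 (0,0) = (2,1) from rfl,
    show nulaTable.getD 8 (0,0) = (2,2) from rfl,
    pyDelta_eq (0,0) (by decide) bit, pyDelta_eq (1,-1) (by decide) bit, pyDelta_eq (1,0) (by decide) bit,
    pyDelta_eq (1,1) (by decide) bit, pyDelta_eq (2,-2) (by decide) bit, pyDelta_eq (2,-1) (by decide) bit,
    pyDelta_eq (2,0) (by decide) bit, pyDelta_eq (2,1) (by decide) bit, pyDelta_eq (2,2) (by decide) bit,
    List.mem_append, mem_seg, altHit]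
  rw [show PySem.List.pyRange 1 (PySem.Int.floordiv (2 + 0) 2 + 1) 1 = [1] from by decide]
  simp only [List.any_cons, List.any_nil]
  rw [show PySem.List.pyRange (2 + 0 - 1) (2 + 0) 1 = [1] from by decide]
  simp only [List.all_cons, List.all_nil, Bool.or_eq_true, Bool.and_eq_true, beq_iff_eq,
    act_eq state 2 0 6 (by norm_num) (by norm_num) (by norm_num),
    act_eq state (2 - 1) 0 2 (by norm_num) (by norm_num) (by norm_num),
    act_eq state (2 - 1) (0 + 1) 3 (by norm_num) (by norm_num) (by norm_num),
    act_eq state (2 - 1) (0 - 1) 1 (by norm_num) (by norm_num) (by norm_num),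
    sl1 bit (2 + 0) (2 + 0 + 1) (by norm_num) (by norm_num),
    sl2 bit (2 + -1) 2 (2 + -1 + 2) (by norm_num) (by norm_num) (by norm_num)]
  norm_num
  all_goals tauto

set_option maxHeartbeats 4000000 in
theorem key7 (state : List Int) (bit : String) :
    (nulaTable.getD 7 (0,0) ∈ Anew state bit) ↔ altHit state bit 2 1 = true := by
  rw [memAnew, exists9]
  simp only [show nulaTable.getD 0 (0,0) = (0,0) from rfl, show nulaTable.getD 1 (0,0) = (1,-1) from rfl,
    show nulaTable.getD 2 (0,0) = (1,0) from rfl, show nulaTable.getD 3 (0,0) = (1,1) from rfl,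
    show nulaTable.getD 4 (0,0) = (2,-2) from rfl, show nulaTable.getD 5 (0,0) = (2,-1) from rfl,
    show nulaTable.getD 6 (0,0) = (2,0) from rfl, show nulaTable.getD 7 (0,0) = (2,1) from rfl,
    show nulaTable.getD 8 (0,0) = (2,2) from rfl,
    pyDelta_eq (0,0) (by decide) bit, pyDelta_eq (1,-1) (by decide) bit, pyDelta_eq (1,0) (by decide) bit,
    pyDelta_eq (1,1) (by decide) bit, pyDelta_eq (2,-2) (by decide) bit, pyDelta_eq (2,-1) (by decide) bit,
    pyDelta_eq (2,0) (by decide) bit, pyDelta_eq (2,1) (by decide) bit, pyDelta_eq (2,2) (by decide) bit,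
    List.mem_append, mem_seg, altHit]
  rw [show PySem.List.pyRange 1 (PySem.Int.floordiv (2 + 1) 2 + 1) 1 = [1] from by decide]
  simp only [List.any_cons, List.any_nil]
  rw [show PySem.List.pyRange (2 + 1 - 1) (2 + 1) 1 = [2] from by decide]
  simp only [List.all_cons, List.all_nil, Bool.or_eq_true, Bool.and_eq_true, beq_iff_eq,
    act_eq state 2 1 7 (by norm_num) (by norm_num) (by norm_num),
    act_eq state (2 - 1) 1 3 (by norm_num) (by norm_num) (by norm_num),
    act_false state (2 - 1) (1 + 1) (by norm_num),
    act_eq state (2 - 1) (1 - 1) 2 (by norm_num) (by norm_num) (by norm_num),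
    sl1 bit (2 + 1) (2 + 1 + 1) (by norm_num) (by norm_num),
    sl2 bit (2 + 0) 3 (2 + 0 + 2) (by norm_num) (by norm_num) (by norm_num)]
  norm_num
  all_goals tauto

set_option maxHeartbeats 4000000 in
theorem key8 (state : List Int) (bit : String) :
    (nulaTable.getD 8 (0,0) ∈ Anew state bit) ↔ altHit state bit 2 2 = true := by
  rw [memAnew, exists9]
  simp only [show nulaTable.getD 0 (0,0) = (0,0) from rfl, show nulaTable.getD 1 (0,0) = (1,-1) from rfl,
    show nulaTable.getD 2 (0,0) = (1,0) from rfl, show nulaTable.getD 3 (0,0) = (1,1) from rfl,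
    show nulaTable.getD 4 (0,0) = (2,-2) from rfl, show nulaTable.getD 5 (0,0) = (2,-1) from rfl,
    show nulaTable.getD 6 (0,0) = (2,0) from rfl, show nulaTable.getD 7 (0,0) = (2,1) from rfl,
    show nulaTable.getD 8 (0,0) = (2,2) from rfl,
    pyDelta_eq (0,0) (by decide) bit, pyDelta_eq (1,-1) (by decide) bit, pyDelta_eq (1,0) (by decide) bit,
    pyDelta_eq (1,1) (by decide) bit, pyDelta_eq (2,-2) (by decide) bit, pyDelta_eq (2,-1) (by decide) bit,
    pyDelta_eq (2,0) (by decide) bit, pyDelta_eq (2,1) (by decide) bit, pyDelta_eq (2,2) (by decide) bit,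
    List.mem_append, mem_seg, altHit]
  rw [show PySem.List.pyRange 1 (PySem.Int.floordiv (2 + 2) 2 + 1) 1 = [1, 2] from by decide]
  simp only [List.any_cons, List.any_nil]
  rw [show PySem.List.pyRange (2 + 2 - 1) (2 + 2) 1 = [3] from by decide,
      show PySem.List.pyRange (2 + 2 - 2) (2 + 2) 1 = [2, 3] from by decide]
  simp only [List.all_cons, List.all_nil, Bool.or_eq_true, Bool.and_eq_true, beq_iff_eq,
    act_eq state 2 2 8 (by norm_num) (by norm_num) (by norm_num),
    act_false state (2 - 1) 2 (by norm_num),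
    act_false state (2 - 1) (2 + 1) (by norm_num),
    act_eq state (2 - 1) (2 - 1) 3 (by norm_num) (by norm_num) (by norm_num),
    act_eq state (2 - 2) (2 - 2) 0 (by norm_num) (by norm_num) (by norm_num),
    sl1 bit (2 + 2) (2 + 2 + 1) (by norm_num) (by norm_num),
    sl2 bit (2 + 1) 4 (2 + 1 + 2) (by norm_num) (by norm_num) (by norm_num),
    sl3 bit (2 + 0) 3 4 (2 + 0 + 3) (by norm_num) (by norm_num) (by norm_num) (by norm_num)]
  norm_num
  all_goals tauto

set_option maxHeartbeats 2000000 in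
theorem A_eq (state : List Int) (bit : String) :
    DULA_transition state bit =
      (mkRep (fun j => if nulaTable.getD j.toNat (0, 0) ∈ Anew state bit then 1 else 0)).items := by
  have h0 : DULA_transition state bit =
      ((PySem.List.pyRange 0 (9 : Int) 1).foldl (fun d j =>
        match PySem.List.pyGet? nulaTable j with
        | some s => if s ∈ Anew state bit then d.insert j 1 else d.insert j 0
        | none => d) (PySem.Dict.empty : PySem.Dict Int Int)).items := rfl
  have hsw : ((PySem.List.pyRange 0 (9 : Int) 1).foldl (fun d j =>
      match PySem.List.pyGet? nulaTable j with
      | some s => if s ∈ Anew state bit then d.insert j 1 else d.insert j 0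
      | none => d) (PySem.Dict.empty : PySem.Dict Int Int))
      = ((PySem.List.pyRange 0 (9 : Int) 1).foldl (fun d j =>
      match PySem.List.pyGet? nulaTable j with
      | some s => d.insert j (if s ∈ Anew state bit then 1 else 0)
      | none => d) (PySem.Dict.empty : PySem.Dict Int Int)) := by
    apply PySem.List.foldl_congr_mem
    intro d j hj
    cases PySem.List.pyGet? nulaTable j with
    | none => rfl
    | some s => by_cases h : s ∈ Anew state bit <;> simp [h]
  rw [h0, hsw, show PySem.List.pyRange 0 (9 : Int) 1 = [0, 1, 2, 3, 4, 5, 6, 7, 8] from by decide]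
  simp only [List.foldl_cons, List.foldl_nil,
    show PySem.List.pyGet? nulaTable 0 = some (0, 0) from by decide,
    show PySem.List.pyGet? nulaTable 1 = some (1, -1) from by decide,
    show PySem.List.pyGet? nulaTable 2 = some (1, 0) from by decide,
    show PySem.List.pyGet? nulaTable 3 = some (1, 1) from by decide,
    show PySem.List.pyGet? nulaTable 4 = some (2, -2) from by decide,
    show PySem.List.pyGet? nulaTable 5 = some (2, -1) from by decide,
    show PySem.List.pyGet? nulaTable 6 = some (2, 0) from by decide,
    show PySem.List.pyGet? nulaTable 7 = some (2, 1) from by decide,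
    show PySem.List.pyGet? nulaTable 8 = some (2, 2) from by decide]
  rw [show ∀ b0 b1 b2 b3 b4 b5 b6 b7 b8 : Int,
      ((((((((((PySem.Dict.empty : PySem.Dict Int Int).insert 0 b0).insert 1 b1).insert 2 b2).insert 3 b3).insert 4 b4).insert 5 b5).insert 6 b6).insert 7 b7).insert 8 b8)
      = mkRep (fun j => if j = 0 then b0 else if j = 1 then b1 else if j = 2 then b2 else if j = 3 then b3 else if j = 4 then b4 else if j = 5 then b5 else if j = 6 then b6 else if j = 7 then b7 else b8) from items_chain]
  refine congrArg PySem.Dict.items (mkRep_congr _ _ ?_)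
  intro j hj
  interval_cases j <;> (try norm_num [nulaTable]) <;> (try rfl)

set_option maxHeartbeats 2000000 in
theorem B_eq (state : List Int) (bit : String) :
    DULA_transition_alt state bit =
      (mkRep (fun j => if altHit state bit (nulaTable.getD j.toNat (0, 0)).1 (nulaTable.getD j.toNat (0, 0)).2 then 1 else 0)).items := by
  unfold DULA_transition_alt
  rw [show PySem.List.pyRange 0 3 1 = [0, 1, 2] from by decide]
  simp only [List.foldl_cons, List.foldl_nil]
  norm_num
  rw [show PySem.List.pyRange (0:Int) 1 1 = [0] from by decide,
      show PySem.List.pyRange (-1:Int) 2 1 = [-1, 0, 1] from by decide,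
      show PySem.List.pyRange (-2:Int) 3 1 = [-2, -1, 0, 1, 2] from by decide]
  simp only [List.foldl_cons, List.foldl_nil]
  norm_num
  rw [items_chain]
  refine congrArg PySem.Dict.items (mkRep_congr _ _ ?_)
  intro j hj
  interval_cases j <;> rfl

-- ===== VERDICT (by name: the statement is the Claim_ definition above) =====
theorem DULA_transition_spec : Claim_equal_DULA_transition := by
  intro state bit _ _
  unfold Spec_DULA_transition
  rw [A_eq, B_eq]
  refine congrArg PySem.Dict.items (mkRep_congr _ _ ?_)
  intro j hj
  interval_cases j
  exacts [if_congr (key0 state bit) rfl rfl, if_congr (key1 state bit) rfl rfl,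
    if_congr (key2 state bit) rfl rfl, if_congr (key3 state bit) rfl rfl,
    if_congr (key4 state bit) rfl rfl, if_congr (key5 state bit) rfl rfl,
    if_congr (key6 state bit) rfl rfl, if_congr (key7 state bit) rfl rfl,
    if_congr (key8 state bit) rfl rfl]
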